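-- pv_equiv track=rewrite | github.com/ntgitis/Python | PY01060 - Tich chu so - Tong chu so.py | solve
-- ===== SOURCE A (Python) =====
-- def solve(n):
--     chan = 0
--     le = 1
--     for i in range(len(n)):
--         if i % 2 == 0:
--             le *= int(n[i]) if n[i] != '0' else 1
--         else:
--             chan += int(n[i])
--     return chan, le
-- ===== SOURCE B (Python) =====
-- def solve(n):
--     # Histogram algorithm: convert once to digits, split by stride-2 slices,
--     # then build the product as a closed form prod(d**count) over d=2..9
--     # (digits 0 and 1 contribute the factor 1 exactly as A's 0->1 rule does)
--     # and the sum as sum() of the odd-position slice.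
--     digs = [int(c) for c in n]
--     evens = digs[::2]
--     odds = digs[1::2]
--     le = 1
--     for d in range(2, 10):
--         le *= d ** evens.count(d)
--     return sum(odds), le
-- ===== Notes on version B (the rewrite author's own statement) =====
-- stated objective: alternative
-- what changed: Replaced A's single index loop with a parity branch by a staged pipeline: convert the string to digits once, split it into stride-2 slices, compute the sum with sum() of the odd slice, and build the product from a digit histogram as prod(d**evens.count(d) for d in 2..9), the 0->1 rule falling out of skipping digits 0 and 1.
import Mathlib
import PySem

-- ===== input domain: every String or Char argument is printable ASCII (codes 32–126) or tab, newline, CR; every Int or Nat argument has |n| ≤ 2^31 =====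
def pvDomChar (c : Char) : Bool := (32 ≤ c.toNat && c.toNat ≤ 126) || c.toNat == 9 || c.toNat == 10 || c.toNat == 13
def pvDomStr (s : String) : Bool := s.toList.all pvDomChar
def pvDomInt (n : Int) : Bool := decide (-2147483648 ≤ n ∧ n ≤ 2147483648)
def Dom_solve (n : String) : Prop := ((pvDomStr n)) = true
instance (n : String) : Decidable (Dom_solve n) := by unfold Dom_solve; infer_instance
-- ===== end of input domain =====

-- B replaces A's one index loop with a parity branch by a staged pipeline (digits once,
-- stride-2 slices, sum() of the odd slice, product as a d^count histogram over d=2..9);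
-- same O(n) cost, alternative algorithm.

-- ===== PORT A =====
-- int(n[i]) for the single character n[i]; none (ValueError) is excluded by Pre_solve
def solve (n : String) : Int × Int :=
  (PySem.List.pyRange 0 (PySem.Str.len n) 1).foldl
    (fun (st : Int × Int) i =>
      let c := PySem.List.pyGetD n.toList i ' '
      if i % 2 == 0 then
        (st.1, st.2 * (if c != '0' then (PySem.Int.ofChars? [c]).getD 0 else 1))
      else
        (st.1 + (PySem.Int.ofChars? [c]).getD 0, st.2))
    (0, 1)

-- ===== PORT B =====
-- Source B step for step: digs = [int(c) for c in n]; evens = digs[::2]; odds = digs[1::2];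
-- le = fold over range(2,10) of le * d ** evens.count(d); return (sum(odds), le).
-- The two slices never raise (step 2 ≠ 0), so .getD [] is exact.
def solve_alt (n : String) : Int × Int :=
  let digs := n.toList.map (fun c => (PySem.Int.ofChars? [c]).getD 0)
  let evens := (PySem.List.slice? digs none none 2).getD []
  let odds := (PySem.List.slice? digs (some 1) none 2).getD []
  let le := (PySem.List.pyRange 2 10 1).foldl
    (fun le d => le * d ^ (PySem.List.count evens d)) 1
  (odds.sum, le)

-- ===== PRECONDITION & SPEC =====
-- Pre_: every character is a decimal digit; on any other character Python's int() raises
-- ValueError in both A and B.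
def Pre_solve (n : String) : Prop := n.toList.all PySem.Chars.isdigit = true
instance (n : String) : Decidable (Pre_solve n) := by unfold Pre_solve; infer_instance
def pvWitness_solve : String := "30405"
def Spec_solve (n : String) (out : Int × Int) : Prop := out = solve_alt n
instance (n : String) (out : Int × Int) : Decidable (Spec_solve n out) := by unfold Spec_solve; infer_instance

-- ===== CLAIM (what is proved, stated in full; the proofs are below) =====
def Claim_equal_solve : Prop := ∀ (n : String), Dom_solve n → Pre_solve n → Spec_solve n (solve n)

-- ===== LEMMAS AND PROOFS =====

-- digit value of a single character, A's even-position factor, and its value-level form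
def pvV (c : Char) : Int := (PySem.Int.ofChars? [c]).getD 0
def pvF (c : Char) : Int := if c != '0' then pvV c else 1
def pvG (d : Int) : Int := if d ≤ 1 then 1 else d

-- A's loop as a two-at-a-time recursion (proof-side normal form shared by both sides)
def solveGoB : List Char → Int → Int → Int × Int
  | a :: b :: rest, chan, le => solveGoB rest (chan + pvV b) (le * pvF a)
  | [a], chan, le => (chan, le * pvF a)
  | [], chan, le => (chan, le)

-- every-other-element of a list (what a stride-2 slice selects)
def pvEO {α : Type} : List α → List α
  | [] => []
  | [a] => [a]
  | a :: _ :: rest => a :: pvEO rest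

theorem pvEO_cons {α : Type} (x : α) (l : List α) : pvEO (x :: l) = x :: pvEO l.tail := by
  cases l <;> rfl

theorem pvEO_map {α β : Type} (h : α → β) (l : List α) : pvEO (l.map h) = (pvEO l).map h := by
  induction l using pvEO.induct <;> simp_all [pvEO]

theorem pvEO_subset {α : Type} (l : List α) (x : α) (hx : x ∈ pvEO l) : x ∈ l := by
  induction l using pvEO.induct <;> simp_all [pvEO]
  rcases hx with h | h
  · simp [h]
  · simp_all

-- ---- A side: the fold equals solveGoB ----

theorem solve_main (cs : List Char) (s : Int) (chan le : Int) (hs : s % 2 = 0) :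
    (PySem.List.enumerate cs s).foldl
      (fun (st : Int × Int) (p : Int × Char) =>
        let c := p.2
        if p.1 % 2 == 0 then
          (st.1, st.2 * (if c != '0' then (PySem.Int.ofChars? [c]).getD 0 else 1))
        else
          (st.1 + (PySem.Int.ofChars? [c]).getD 0, st.2))
      (chan, le) = solveGoB cs chan le := by
  induction cs, chan, le using solveGoB.induct generalizing s with
  | case3 chan le => simp [solveGoB, PySem.List.enumerate]
  | case2 a chan le =>
    have h0 : (s % 2 == 0) = true := by simpa using hs
    simp only [PySem.List.enumerate, List.foldl_cons, List.foldl_nil, h0, if_true, solveGoB]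
    rfl
  | case1 a b rest chan le ih =>
    have h0 : (s % 2 == 0) = true := by simpa using hs
    have h1 : ((s + 1) % 2 == 0) = false := by
      simp only [beq_eq_false_iff_ne, ne_eq]; omega
    have h2 : (s + 1 + 1) % 2 = 0 := by omega
    simp only [PySem.List.enumerate, List.foldl_cons, h0, h1, if_true]
    rw [if_neg Bool.false_ne_true]
    have h3 := ih _ h2
    simp only [solveGoB, pvV, pvF] at h3 ⊢
    exact h3

theorem solve_eq_goB (n : String) : solve n = solveGoB n.toList 0 1 := by
  have key := solve_main n.toList 0 0 1 (by decide)
  rw [solve, ← key, PySem.List.enumerate_eq_map_pyRange (xs := n.toList) (d := ' '),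
    List.foldl_map]
  simp [PySem.Str.len_eq, PySem.List.len_eq]

-- ---- solveGoB in closed form over the two stride-2 sublists ----

theorem goB_closed (cs : List Char) (chan le : Int) :
    solveGoB cs chan le
      = (chan + ((pvEO cs.tail).map pvV).sum, le * ((pvEO cs).map pvF).prod) := by
  induction cs, chan, le using solveGoB.induct with
  | case3 chan le => simp [solveGoB, pvEO]
  | case2 a chan le => simp [solveGoB, pvEO]
  | case1 a b rest chan le ih =>
    rw [solveGoB, ih]
    simp only [pvEO_cons, List.tail_cons, List.map_cons, List.prod_cons, List.sum_cons,
      Prod.mk.injEq]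
    constructor <;> ring

-- ---- the stride-2 slices are pvEO ----

theorem filterMap_two (α : Type) (xs : List α) (m : Nat) (h : xs.length ≤ 2 * m) :
    (List.range m).filterMap (fun k => xs[2 * k]?) = pvEO xs := by
  induction xs using pvEO.induct generalizing m with
  | case1 => simp [pvEO]
  | case2 a =>
    obtain ⟨m', rfl⟩ : ∃ m', m = m' + 1 := ⟨m - 1, by simp at h; omega⟩
    rw [List.range_succ_eq_map]
    simp [pvEO, List.filterMap_map]
  | case3 a b rest ih =>
    obtain ⟨m', rfl⟩ : ∃ m', m = m' + 1 := ⟨m - 1, by simp at h; omega⟩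
    rw [List.range_succ_eq_map]
    simp only [List.filterMap_cons, List.filterMap_map, Function.comp_def]
    have he : ∀ k, (a :: b :: rest)[2 * (k + 1)]? = rest[2 * k]? := by
      intro k
      have : 2 * (k + 1) = 2 * k + 1 + 1 := by omega
      simp [this]
    simp only [he]
    rw [ih m' (by simp at h; omega)]
    simp [pvEO]

theorem slice_two_even (α : Type) (xs : List α) :
    (PySem.List.slice? xs none none 2).getD [] = pvEO xs := by
  simp only [PySem.List.slice?, PySem.List.sliceIndices]
  norm_num
  split
  · next h0 =>
    have hf : (fun (k : Nat) => xs[((2:Int) * (k:Int)).toNat]?) = fun k => xs[2 * k]? := by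
      funext k
      rw [show ((2:Int) * (k:Int)).toNat = 2 * k by omega]
    rw [hf]
    have hm : ((xs.length : Int) + 2 - 1) / 2 = (((xs.length + 1) / 2 : Nat) : Int) := by
      rw [Int.natCast_div]
      push_cast
      ring_nf
    rw [hm, Int.toNat_natCast]
    exact filterMap_two α xs _ (by omega)
  · next h0 =>
    have : xs.length = 0 := by omega
    rw [List.length_eq_zero_iff.mp this]
    rfl

theorem slice_two_odd (α : Type) (xs : List α) :
    (PySem.List.slice? xs (some 1) none 2).getD [] = pvEO xs.tail := by
  cases xs with
  | nil => rfl
  | cons x t =>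
    simp only [PySem.List.slice?, PySem.List.sliceIndices]
    norm_num
    by_cases ht : 0 < t.length
    · rw [if_pos ht]
      have hf : (fun (k : Nat) => (x :: t)[((1:Int) + 2 * (k:Int)).toNat]?)
          = fun k => t[2 * k]? := by
        funext k
        rw [show ((1:Int) + 2 * (k:Int)).toNat = 2 * k + 1 by omega]
        simp
      rw [hf]
      have hm : ((t.length : Int) + 2 - 1) / 2 = (((t.length + 1) / 2 : Nat) : Int) := by
        rw [Int.natCast_div]
        push_cast
        ring_nf
      rw [hm, Int.toNat_natCast]
      exact filterMap_two α t _ (by omega)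
    · rw [if_neg ht]
      have : t.length = 0 := by omega
      rw [List.length_eq_zero_iff.mp this]
      rfl

-- ---- digit characters ----

theorem digit_cases (c : Char) (h : PySem.Chars.isdigit c = true) :
    c = '0' ∨ c = '1' ∨ c = '2' ∨ c = '3' ∨ c = '4' ∨ c = '5' ∨ c = '6' ∨ c = '7' ∨ c = '8' ∨ c = '9' := by
  simp [PySem.Chars.isdigit, Char.le_def, UInt32.le_iff_toNat_le] at h
  obtain ⟨h1, h2⟩ := h
  have hc : ∀ m : Nat, c.toNat = m → c = Char.ofNat m := by
    intro m hm
    have h4 := Char.ofNat_toNat c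
    rw [hm] at h4
    exact h4.symm
  have hv : c.toNat = 48 ∨ c.toNat = 49 ∨ c.toNat = 50 ∨ c.toNat = 51 ∨ c.toNat = 52 ∨ c.toNat = 53 ∨ c.toNat = 54 ∨ c.toNat = 55 ∨ c.toNat = 56 ∨ c.toNat = 57 := by
    omega
  rcases hv with h|h|h|h|h|h|h|h|h|h <;> rw [hc _ h] <;> tauto

theorem digit_facts (c : Char) (h : PySem.Chars.isdigit c = true) :
    (0 ≤ pvV c ∧ pvV c < 10) ∧ pvF c = pvG (pvV c) := by
  rcases digit_cases c h with h|h|h|h|h|h|h|h|h|h <;> subst h <;> decide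

-- ---- the histogram product over d = 2..9 ----

theorem hgram (es : List Int) (h : ∀ x ∈ es, 0 ≤ x ∧ x < 10) :
    (es.map pvG).prod
      = 2 ^ (es.count 2) * 3 ^ (es.count 3) * 4 ^ (es.count 4) * 5 ^ (es.count 5)
        * 6 ^ (es.count 6) * 7 ^ (es.count 7) * 8 ^ (es.count 8) * 9 ^ (es.count 9) := by
  induction es with
  | nil => simp
  | cons x es ih =>
    have hx := h x (List.mem_cons_self)
    have hes : ∀ y ∈ es, 0 ≤ y ∧ y < 10 := fun y hy => h y (List.mem_cons_of_mem _ hy)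
    have hx1 : 0 ≤ x := hx.1
    have hx2 : x < 10 := hx.2
    interval_cases x <;>
      simp only [List.map_cons, List.prod_cons, List.count_cons, ih hes, pvG] <;>
      norm_num [pow_succ] <;> ring

-- ===== VERDICT (by name: the statement is the Claim_ definition above) =====
theorem solve_spec : Claim_equal_solve := by
  intro n _ hpre
  show solve n = solve_alt n
  have hdig : ∀ c ∈ n.toList, PySem.Chars.isdigit c = true := by
    intro c hc
    exact List.all_eq_true.mp hpre c hc
  rw [solve_eq_goB, goB_closed, solve_alt]
  simp only [slice_two_even, slice_two_odd, PySem.List.count_eq]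
  rw [← List.map_tail]
  rw [show (fun c => (PySem.Int.ofChars? [c]).getD (0:Int)) = pvV from rfl]
  rw [pvEO_map, pvEO_map]
  have hes : ∀ x ∈ (pvEO n.toList).map pvV, 0 ≤ x ∧ x < 10 := by
    intro x hx
    obtain ⟨c, hc, rfl⟩ := List.mem_map.mp hx
    exact (digit_facts c (hdig c (pvEO_subset _ _ hc))).1
  have hrange : PySem.List.pyRange 2 10 1 = [2, 3, 4, 5, 6, 7, 8, 9] := by decide
  rw [hrange]
  refine Prod.ext (by rw [zero_add]) ?_
  show (1 : Int) * ((pvEO n.toList).map pvF).prod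
      = [2, 3, 4, 5, 6, 7, 8, 9].foldl
          (fun le (d : Int) => le * d ^ (((pvEO n.toList).map pvV).count d)) 1
  have hfg : (pvEO n.toList).map pvF = ((pvEO n.toList).map pvV).map pvG := by
    rw [List.map_map]
    apply List.map_congr_left
    intro c hc
    exact (digit_facts c (hdig c (pvEO_subset _ _ hc))).2
  rw [hfg, hgram _ hes]
  simp [List.foldl]
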